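-- pv_equiv track=rewrite | github.com/HwangJae-won/Coding_Test | 프로그래머스/lv1/calculcate_money.py | solution
-- ===== SOURCE A (Python) =====
-- def solution(price, money, count):
--     temp =[]
--     for i in range(1, count+1):
--         temp.append(price*i)
--     if sum(temp) <= money:
--         answer = 0
--     else:
--         answer= sum(temp)- money
--     return answer
-- ===== SOURCE B (Python) =====
-- def solution(price, money, count):
--     n = max(count, 0)
--     total = price * n * (n + 1) // 2
--     return max(0, total - money)
-- ===== Notes on version B (the rewrite author's own statement) =====
-- stated objective: faster
-- what changed: Replaces the O(count) loop that builds a list and sums it (twice) with the closed-form arithmetic series price*n*(n+1)//2 and a max(0, .) clamp.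
import Mathlib
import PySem

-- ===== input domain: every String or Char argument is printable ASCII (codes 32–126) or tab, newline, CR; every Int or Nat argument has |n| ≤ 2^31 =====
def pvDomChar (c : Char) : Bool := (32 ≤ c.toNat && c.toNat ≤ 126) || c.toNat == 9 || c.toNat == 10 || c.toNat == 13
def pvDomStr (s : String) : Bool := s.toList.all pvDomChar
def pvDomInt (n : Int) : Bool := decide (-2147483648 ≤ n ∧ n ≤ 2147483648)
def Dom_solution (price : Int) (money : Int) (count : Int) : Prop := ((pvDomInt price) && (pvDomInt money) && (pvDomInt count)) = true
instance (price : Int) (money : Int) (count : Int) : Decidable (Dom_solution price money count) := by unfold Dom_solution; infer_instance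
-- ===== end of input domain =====

-- B replaces A's O(count) list-building loop with the closed-form series price*n*(n+1)//2 (faster).
-- ===== PORT A =====
def solution (price : Int) (money : Int) (count : Int) : Int :=
  let temp := (PySem.List.pyRange 1 (count + 1) 1).foldl (fun acc i => acc ++ [price * i]) []
  if temp.sum ≤ money then 0 else temp.sum - money

-- ===== PORT B =====
def solution_alt (price : Int) (money : Int) (count : Int) : Int :=
  let n := max count 0
  let total := PySem.Int.floordiv (price * n * (n + 1)) 2
  max 0 (total - money)

-- ===== PRECONDITION & SPEC =====
def Spec_solution (price : Int) (money : Int) (count : Int) (out : Int) : Prop := out = solution_alt price money count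
instance (price : Int) (money : Int) (count : Int) (out : Int) : Decidable (Spec_solution price money count out) := by unfold Spec_solution; infer_instance

-- ===== CLAIM (what is proved, stated in full; the proofs are below) =====
def Claim_equal_solution : Prop := ∀ (price : Int) (money : Int) (count : Int), Dom_solution price money count → Spec_solution price money count (solution price money count)

-- ===== LEMMAS AND PROOFS =====

-- ===== VERDICT (by name: the statement is the Claim_ definition above) =====
-- sum of the temp list built by A equals the closed form
lemma pv_sum_range (price : Int) (m : Nat) :
    (((PySem.List.pyRange 1 ((m : Int) + 1) 1).foldl (fun acc i => acc ++ [price * i]) []).sum)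
      = price * m * (m + 1) / 2 := by
  induction m with
  | zero => simp [PySem.List.pyRange_one_eq_nil]
  | succ k ih =>
    push_cast
    rw [show ((k : Int) + 1 + 1) = ((k : Int) + 1) + 1 by ring,
        PySem.List.pyRange_one_succ_right (by omega),
        List.foldl_append]
    simp only [List.foldl_cons, List.foldl_nil, List.sum_append, List.sum_cons, List.sum_nil]
    rw [ih]
    obtain ⟨u, hu⟩ := (Int.even_mul_succ_self (k : Int)).two_dvd
    obtain ⟨v, hv⟩ := (Int.even_mul_succ_self ((k : Int) + 1)).two_dvd
    have q1 : price * (k : Int) * ((k : Int) + 1) / 2 = price * u := by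
      rw [mul_assoc, Int.mul_ediv_assoc price ⟨u, hu⟩, hu, Int.mul_ediv_cancel_left u two_ne_zero]
    have q2 : price * ((k : Int) + 1) * ((k : Int) + 1 + 1) / 2 = price * v := by
      rw [mul_assoc, Int.mul_ediv_assoc price ⟨v, hv⟩, hv, Int.mul_ediv_cancel_left v two_ne_zero]
    have hv' : v = u + ((k : Int) + 1) := by
      have h2 : 2 * v = 2 * (u + ((k : Int) + 1)) := by
        rw [← hv, show ((k : Int) + 1) * ((k : Int) + 1 + 1)
              = (k : Int) * ((k : Int) + 1) + 2 * ((k : Int) + 1) by ring, hu]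
        ring
      omega
    rw [q1, q2, hv']
    ring

-- ===== VERDICT (by name: the statement is the Claim_ definition above) =====
theorem solution_spec : Claim_equal_solution := by
  intro price money count _
  unfold Spec_solution solution solution_alt
  by_cases h : count ≤ 0
  · rw [PySem.List.pyRange_one_eq_nil (by omega)]
    have hn : max count 0 = 0 := by omega
    simp [hn, PySem.Int.floordiv]
    omega
  · push_cast at h
    obtain ⟨m, rfl⟩ : ∃ m : Nat, count = (m : Int) := ⟨count.toNat, by omega⟩
    have hs := pv_sum_range price m
    have hn : max ((m:Int)) 0 = (m:Int) := by omega
    simp only [hs, hn, PySem.Int.floordiv_eq_ediv_of_pos (show (0:Int) < 2 by norm_num)]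
    split <;> omega
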